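-- pv_equiv track=rewrite | github.com/sterliakov/advent-of-code-24 | a.py | _solve
-- ===== SOURCE A (Python) =====
-- def _solve(edges, vertices):
--     ans = 0
--     for a, b in edges:
--         if not a.startswith("t"):
--             continue
--         for c in vertices:
--             if c>b and (a, c) in edges and (b, c) in edges:
--                 ans += [6,3,1][(b[0]=='t')+(c[0]=='t')]
--     return ans//6
-- ===== SOURCE B (Python) =====
-- def _solve(edges, vertices):
--     # Build successor adjacency sets once, then per t-edge iterate the
--     # neighbour intersection instead of scanning all vertices.
--     succ = {}
--     for a, b in edges:
--         succ.setdefault(a, set()).add(b)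
--     cnt = {}
--     for v in vertices:
--         cnt[v] = cnt.get(v, 0) + 1
--     empty = set()
--     total = 0
--     for a, b in edges:
--         if a.startswith("t"):
--             for c in succ[a] & succ.get(b, empty):
--                 if c > b:
--                     if b.startswith("t"):
--                         w = 1 if c.startswith("t") else 3
--                     else:
--                         w = 3 if c.startswith("t") else 6
--                     total += cnt.get(c, 0) * w
--     return total // 6
-- ===== Notes on version B (the rewrite author's own statement) =====
-- stated objective: alternative
-- what changed: B builds successor adjacency sets and a vertex-multiplicity dict once, then for each t-edge iterates the intersection of the two endpoints' neighbour sets instead of scanning every vertex with per-vertex edge membership tests.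
-- outside the precondition, e.g. on _solve({('a', '')}, {'b'}): A returns 0, B returns 0
-- crash fix: When some t-edge (a, "") with empty second endpoint closes a triangle, A raises IndexError on b[0]; B returns the weighted triangle count (e.g. 1 at the raise witness). — e.g. on _solve([("t", ""), ("t", "a"), ("", "a")], ["a"]): A raises IndexError, B returns 1
import Mathlib
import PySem

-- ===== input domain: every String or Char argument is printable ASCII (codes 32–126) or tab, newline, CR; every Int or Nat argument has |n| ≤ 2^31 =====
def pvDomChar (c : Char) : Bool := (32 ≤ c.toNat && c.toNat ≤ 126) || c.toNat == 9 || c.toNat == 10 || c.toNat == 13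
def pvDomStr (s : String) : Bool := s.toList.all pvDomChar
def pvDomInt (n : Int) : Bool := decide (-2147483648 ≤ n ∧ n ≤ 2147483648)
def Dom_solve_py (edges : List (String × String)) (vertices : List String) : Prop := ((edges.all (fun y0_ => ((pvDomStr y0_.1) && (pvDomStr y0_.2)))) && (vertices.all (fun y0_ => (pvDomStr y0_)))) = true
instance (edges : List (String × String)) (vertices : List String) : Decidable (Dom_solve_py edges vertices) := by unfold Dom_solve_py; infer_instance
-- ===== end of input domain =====

-- B replaces A's scan of all vertices per t-edge by adjacency sets and per-edge
-- neighbour-intersection iteration with a vertex-multiplicity dict (objective: alternative).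
-- Python string comparison 'c > b' is lexicographic on code points: ported exactly as
-- List Char '<' on .toList throughout (both ports).

-- ===== PORT A =====
-- weight [6,3,1][(b[0]=='t')+(c[0]=='t')]; b[0]/c[0] via pyGet? (none = IndexError,
-- excluded by Pre_; c is nonempty whenever this is reached, see lemmas)
def pvWeightA (b c : String) : Int :=
  PySem.List.pyGetD ([6, 3, 1] : List Int)
    ((if PySem.Str.pyGet? b 0 = some 't' then (1 : Int) else 0) +
     (if PySem.Str.pyGet? c 0 = some 't' then (1 : Int) else 0)) 0

def solve_py (edges : List (String × String)) (vertices : List String) : Int :=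
  PySem.Int.floordiv
    (edges.foldl (fun ans p =>
      if !(PySem.Str.startswith p.1 "t") then ans
      else vertices.foldl (fun ans c =>
        if decide (p.2.toList < c.toList) && edges.contains (p.1, c) && edges.contains (p.2, c)
        then ans + pvWeightA p.2 c else ans) ans) 0) 6

-- ===== PORT B =====
def pvWeightB (b c : String) : Int :=
  if PySem.Str.startswith b "t" then (if PySem.Str.startswith c "t" then 1 else 3)
  else (if PySem.Str.startswith c "t" then 3 else 6)

-- succ.setdefault(a, set()).add(b)  (in-place add = Dict.modify with default empty set)
def pvSucc (edges : List (String × String)) : PySem.Dict String (PySem.Set String) :=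
  edges.foldl (fun d p => d.modify p.1 PySem.Set.empty (fun s => PySem.Set.add s p.2))
    PySem.Dict.empty

def solve_py_alt (edges : List (String × String)) (vertices : List String) : Int :=
  let succ := pvSucc edges
  let cnt : PySem.Dict String Int :=
    vertices.foldl (fun d v => d.insert v (d.getD v 0 + 1)) PySem.Dict.empty
  PySem.Int.floordiv
    (edges.foldl (fun total p =>
      if PySem.Str.startswith p.1 "t" then
        -- succ[a]: the key p.1 is always present here (edge p inserted it), so getD is exact
        (PySem.Set.inter (succ.getD p.1 PySem.Set.empty) (succ.getD p.2 PySem.Set.empty)).foldl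
          (fun total c =>
            if decide (p.2.toList < c.toList)
            then total + cnt.getD c 0 * pvWeightB p.2 c else total) total
      else total) 0) 6

-- ===== PRECONDITION & SPEC =====
-- Pre_ excludes edges whose SECOND endpoint is the empty string: on (and only on) some of
-- those inputs A's b[0] raises IndexError; on the rest A returns and B agrees anyway.
def Pre_solve_py (edges : List (String × String)) (vertices : List String) : Prop :=
  ∀ p ∈ edges, p.2 ≠ ""
instance (edges : List (String × String)) (vertices : List String) : Decidable (Pre_solve_py edges vertices) := by unfold Pre_solve_py; infer_instance

def pvWitness_solve_py : (List (String × String)) × List String :=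
  ([("ta", "b"), ("ta", "c"), ("b", "c")], ["b", "c"])

-- A raises IndexError (b[0] with b = "") exactly when some t-edge (a, "") closes a triangle
-- with a vertex c; B returns the weighted count there.
def Raises_solve_py (edges : List (String × String)) (vertices : List String) : Prop :=
  ∃ p ∈ edges, PySem.Str.startswith p.1 "t" = true ∧ p.2 = "" ∧
    ∃ c ∈ vertices, p.2.toList < c.toList ∧ (p.1, c) ∈ edges ∧ (p.2, c) ∈ edges
instance (edges : List (String × String)) (vertices : List String) : Decidable (Raises_solve_py edges vertices) := by unfold Raises_solve_py; infer_instance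

def pvRaiseWitness_solve_py : (List (String × String)) × List String :=
  ([("t", ""), ("t", "a"), ("", "a")], ["a"])
def pvRaiseWitnessOut_solve_py : Int := 1

def Spec_solve_py (edges : List (String × String)) (vertices : List String) (out : Int) : Prop := out = solve_py_alt edges vertices
instance (edges : List (String × String)) (vertices : List String) (out : Int) : Decidable (Spec_solve_py edges vertices out) := by unfold Spec_solve_py; infer_instance

-- ===== CLAIM (what is proved, stated in full; the proofs are below) =====
def Claim_equal_solve_py : Prop := ∀ (edges : List (String × String)) (vertices : List String), Dom_solve_py edges vertices → Pre_solve_py edges vertices → Spec_solve_py edges vertices (solve_py edges vertices)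

def Claim_raises_solve_py : Prop := (∀ (edges : List (String × String)) (vertices : List String), Dom_solve_py edges vertices → Raises_solve_py edges vertices → ¬ Pre_solve_py edges vertices) ∧ (Dom_solve_py (pvRaiseWitness_solve_py.1) (pvRaiseWitness_solve_py.2) ∧ Raises_solve_py (pvRaiseWitness_solve_py.1) (pvRaiseWitness_solve_py.2) ∧ solve_py_alt (pvRaiseWitness_solve_py.1) (pvRaiseWitness_solve_py.2) = pvRaiseWitnessOut_solve_py)

-- ===== LEMMAS AND PROOFS =====

lemma toList_ne_nil (s : String) (h : s ≠ "") : s.toList ≠ [] := by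
  intro hl
  exact h (String.toList_injective (by simpa using hl))

-- membership in the successor sets built by pvSucc's fold
lemma mem_succ_foldl (l : List (String × String)) (d : PySem.Dict String (PySem.Set String))
    (x y : String) :
    y ∈ ((l.foldl (fun d p => d.modify p.1 PySem.Set.empty (fun s => PySem.Set.add s p.2)) d).getD x PySem.Set.empty)
      ↔ y ∈ (d.getD x PySem.Set.empty) ∨ (x, y) ∈ l := by
  induction l generalizing d with
  | nil => simp
  | cons p t ih =>
    simp only [List.foldl_cons, ih, PySem.Dict.getD_modify, List.mem_cons]
    by_cases hx : x = p.1
    · subst hx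
      simp [PySem.Set.mem_add, Prod.ext_iff]
      tauto
    · simp [hx, Prod.ext_iff]

lemma mem_pvSucc (edges : List (String × String)) (x y : String) :
    y ∈ ((pvSucc edges).getD x PySem.Set.empty) ↔ (x, y) ∈ edges := by
  unfold pvSucc
  rw [mem_succ_foldl]
  simp

lemma nodup_succ_foldl (l : List (String × String)) (d : PySem.Dict String (PySem.Set String))
    (h : ∀ x, ((d.getD x PySem.Set.empty : PySem.Set String)).Nodup) (x : String) :
    ((l.foldl (fun d p => d.modify p.1 PySem.Set.empty (fun s => PySem.Set.add s p.2)) d).getD x PySem.Set.empty : PySem.Set String).Nodup := by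
  induction l generalizing d with
  | nil => exact h x
  | cons p t ih =>
    refine ih _ (fun x' => ?_)
    rw [PySem.Dict.getD_modify]
    split
    · exact PySem.Set.nodup_add _ _ (h p.1)
    · exact h x'

lemma nodup_pvSucc (edges : List (String × String)) (x : String) :
    ((pvSucc edges).getD x PySem.Set.empty : PySem.Set String).Nodup := by
  unfold pvSucc
  exact nodup_succ_foldl edges PySem.Dict.empty (by simp) x

-- b[0] == 't' is startswith("t") for nonempty b
lemma pyGet0_eq_startswith (s : String) (h : s.toList ≠ []) :
    (PySem.Str.pyGet? s 0 = some 't') ↔ PySem.Str.startswith s "t" = true := by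
  simp only [PySem.Str.pyGet?, PySem.Str.startswith, PySem.Chars.startswith]
  cases hl : s.toList with
  | nil => exact absurd hl h
  | cons a l =>
    simp [PySem.Chars.pyGet?, PySem.List.pyGet?, PySem.List.pyIdx?, List.isPrefixOf]
    exact eq_comm

lemma weightA_eq_weightB (b c : String) (hb : b.toList ≠ []) (hlt : b.toList < c.toList) :
    pvWeightA b c = pvWeightB b c := by
  have hc : c.toList ≠ [] := fun h => List.not_lt_nil b.toList (h ▸ hlt)
  unfold pvWeightA pvWeightB
  rw [if_congr (pyGet0_eq_startswith b hb) rfl rfl, if_congr (pyGet0_eq_startswith c hc) rfl rfl]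
  cases h1 : PySem.Str.startswith b "t" <;> cases h2 : PySem.Str.startswith c "t" <;>
    simp only [h1, h2, if_true, if_false, Bool.false_eq_true] <;> rfl

-- an accumulate-if loop is acc + a sum
lemma foldl_if_add {α : Type} (l : List α) (p : α → Bool) (f : α → Int) (a : Int) :
    l.foldl (fun acc x => if p x then acc + f x else acc) a
      = a + (l.map (fun x => if p x then f x else 0)).sum := by
  induction l generalizing a with
  | nil => simp
  | cons x t ih =>
    simp only [List.foldl_cons, List.map_cons, List.sum_cons, ih]
    by_cases hp : p x <;> simp [hp] <;> ring

lemma sum_single_nodup (S : List String) (hS : S.Nodup) (v : String) (g : String → Int) :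
    (S.map (fun c => if c = v then g c else 0)).sum = if v ∈ S then g v else 0 := by
  induction S with
  | nil => simp
  | cons s t ih =>
    simp only [List.nodup_cons] at hS
    simp only [List.map_cons, List.sum_cons, ih hS.2, List.mem_cons]
    by_cases hv : s = v
    · subst hv
      simp [hS.1]
    · simp [hv, Ne.symm hv]

-- summing g over a Nodup list S weighted by multiplicities in vs = summing over vs filtered by S
lemma sum_count_eq_sum_mem (S vs : List String) (hS : S.Nodup) (g : String → Int)
    (P : String → Bool) :
    (S.map (fun c => if P c then (vs.count c : Int) * g c else 0)).sum
      = (vs.map (fun v => if v ∈ S ∧ P v = true then g v else 0)).sum := by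
  induction vs with
  | nil =>
    simp only [List.count_nil, List.map_nil, List.sum_nil]
    rw [List.sum_eq_zero]
    intro x hx
    simp only [List.mem_map] at hx
    obtain ⟨c, _, rfl⟩ := hx
    split <;> simp
  | cons v t ih =>
    simp only [List.map_cons, List.sum_cons, ← ih]
    have key : ∀ c, (if P c then ((v :: t).count c : Int) * g c else 0)
        = (if P c then (t.count c : Int) * g c else 0)
          + (if c = v then (if P c then g c else 0) else 0) := by
      intro c
      rw [List.count_cons]
      by_cases hp : P c
      · by_cases hv : c = v
        · subst hv; simp [hp]; ring
        · simp [hp, hv]; exact Or.inl (Ne.symm hv)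
      · simp [hp]
    simp only [key, PySem.List.sum_map_add_int]
    rw [sum_single_nodup S hS v (fun c => if P c then g c else 0)]
    by_cases hm : v ∈ S
    · by_cases hp : P v <;> simp [hm, hp] <;> ring
    · simp [hm]

-- ===== VERDICT (by name: the statement is the Claim_ definition above) =====
theorem solve_py_spec : Claim_equal_solve_py := by
  intro edges vertices _dom hpre
  unfold Spec_solve_py solve_py solve_py_alt
  set cnt : PySem.Dict String Int :=
    vertices.foldl (fun d v => d.insert v (d.getD v 0 + 1)) PySem.Dict.empty with hcntdef
  congr 1
  apply PySem.List.foldl_congr_mem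
  intro acc p hp
  cases ht : PySem.Str.startswith p.1 "t" with
  | false =>
    simp only [ht, Bool.not_false, Bool.false_eq_true, if_true, if_false]
  | true =>
    simp only [ht, Bool.not_true, Bool.false_eq_true, if_true, if_false]

    have hb : p.2.toList ≠ [] := toList_ne_nil p.2 (hpre p hp)
    set S : PySem.Set String :=
      PySem.Set.inter ((pvSucc edges).getD p.1 PySem.Set.empty)
        ((pvSucc edges).getD p.2 PySem.Set.empty) with hSdef
    have hS : S.Nodup := PySem.Set.nodup_inter _ _ (nodup_pvSucc edges p.1)
    have hmemS : ∀ v, v ∈ S ↔ (p.1, v) ∈ edges ∧ (p.2, v) ∈ edges := by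
      intro v
      rw [hSdef, PySem.Set.mem_inter, mem_pvSucc, mem_pvSucc]
    rw [foldl_if_add vertices
        (fun c => decide (p.2.toList < c.toList) && edges.contains (p.1, c) && edges.contains (p.2, c))
        (fun c => pvWeightA p.2 c) acc,
      foldl_if_add S (fun c => decide (p.2.toList < c.toList))
        (fun c => cnt.getD c 0 * pvWeightB p.2 c) acc]
    congr 1
    have hcnt : ∀ c, cnt.getD c 0 = (vertices.count c : Int) := by
      intro c
      rw [hcntdef, PySem.Dict.getD_foldl_insert_add_one, PySem.Dict.getD_empty, zero_add]
    simp only [hcnt]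
    rw [sum_count_eq_sum_mem S vertices hS (fun c => pvWeightB p.2 c)
        (fun c => decide (p.2.toList < c.toList))]
    apply congrArg List.sum
    apply List.map_congr_left
    intro v _
    by_cases hlt : p.2.toList < v.toList
    · by_cases h1 : (p.1, v) ∈ edges <;> by_cases h2 : (p.2, v) ∈ edges <;>
        simp [hlt, h1, h2, hmemS v, List.contains_iff_mem, weightA_eq_weightB p.2 v hb hlt]
    · simp [hlt, hmemS v]

def solve_py_raises : Claim_raises_solve_py := by
  unfold Claim_raises_solve_py
  constructor
  · rintro edges vertices _dom ⟨p, hp, _, hb, _⟩ hpre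
    exact (hpre p hp) hb
  · exact ⟨by decide, by decide, by decide⟩
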